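-- pv_equiv track=rewrite | github.com/ethan-gobi/frc-flask-scout | frc_scout_v3_reference.py | _tba_fuzzy_match
-- ===== SOURCE A (Python) =====
-- def _tba_fuzzy_match(ocr: int | None, known: list[int]) -> int | None:
--     """Correct single-digit OCR misreads against known TBA team list."""
--     if ocr is None or not known:
--         return ocr
--     if ocr in known:
--         return ocr
--     for team in known:
--         s1, s2 = str(ocr), str(team)
--         if len(s1) == len(s2) and sum(a != b for a, b in zip(s1, s2)) == 1:
--             return team
--     return None
-- ===== SOURCE B (Python) =====
-- def _tba_fuzzy_match(ocr: int | None, known: list[int]) -> int | None: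
--     """Correct single-digit OCR misreads against known TBA team list."""
--     if ocr is None or not known:
--         return ocr
--     if ocr in known:
--         return ocr
--     s = str(ocr)
--     neighbors = set()
--     for i in range(len(s)):
--         for d in "-0123456789":
--             if d != s[i]:
--                 neighbors.add(s[:i] + d + s[i + 1:])
--     for team in known:
--         if str(team) in neighbors:
--             return team
--     return None
-- ===== Notes on version B (the rewrite author's own statement) =====
-- stated objective: alternative
-- what changed: Instead of comparing str(ocr) to each team string character by character, B precomputes once the set of all strings at Hamming distance 1 from str(ocr) (each position replaced by a different character from '-0123456789') and then scans known for the first team whose string is in that set.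
import Mathlib
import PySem

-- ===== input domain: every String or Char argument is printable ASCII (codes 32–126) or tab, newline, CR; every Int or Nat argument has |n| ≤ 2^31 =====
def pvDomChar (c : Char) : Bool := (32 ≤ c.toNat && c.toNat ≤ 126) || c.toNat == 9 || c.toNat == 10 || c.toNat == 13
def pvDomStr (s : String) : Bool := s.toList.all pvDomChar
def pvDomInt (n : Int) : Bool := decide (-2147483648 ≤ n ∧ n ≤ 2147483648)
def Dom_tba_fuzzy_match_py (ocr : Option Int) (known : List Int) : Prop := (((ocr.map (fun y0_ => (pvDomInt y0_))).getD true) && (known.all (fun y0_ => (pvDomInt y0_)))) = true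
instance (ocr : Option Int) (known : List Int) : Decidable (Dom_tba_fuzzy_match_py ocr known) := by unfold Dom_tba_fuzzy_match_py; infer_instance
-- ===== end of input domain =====

-- B replaces A's per-team character comparison by a precomputed set of the Hamming-distance-1
-- neighbour strings of str(ocr), looked up per team (objective: alternative, same cost class).
-- str(n) is ported as PySem.Int.toChars (= (PySem.Int.toStr n).toList, lemma toList_toStr).

-- ===== PORT A =====
-- the 'for team in known' loop: first team whose string has equal length and exactly one
-- differing character (sum(a != b for a, b in zip(s1, s2)) ported as countP over the zip)
def pvALoop (s1 : List Char) : List Int → Option Int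
  | [] => none
  | t :: rest =>
      let s2 := PySem.Int.toChars t
      if s1.length = s2.length ∧ (s1.zip s2).countP (fun p => p.1 != p.2) = 1 then some t
      else pvALoop s1 rest

def tba_fuzzy_match_py (ocr : Option Int) (known : List Int) : Option Int :=
  match ocr with
  | none => none
  | some o =>
    if known.isEmpty then some o
    else if known.contains o then some o
    else pvALoop (PySem.Int.toChars o) known

-- ===== PORT B =====
def pvAlpha : List Char := "-0123456789".toList

-- all strings obtained from s by replacing one position with a different character of pvAlpha
def pvNeighbors (s : List Char) : List (List Char) :=
  (List.range s.length).flatMap (fun i =>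
    pvAlpha.filterMap (fun d => if d = s[i]! then none else some (s.set i d)))

def pvBLoop (nb : PySem.Set (List Char)) : List Int → Option Int
  | [] => none
  | t :: rest =>
      if PySem.Set.contains nb (PySem.Int.toChars t) then some t else pvBLoop nb rest

def tba_fuzzy_match_py_alt (ocr : Option Int) (known : List Int) : Option Int :=
  match ocr with
  | none => none
  | some o =>
    if known.isEmpty then some o
    else if known.contains o then some o
    else pvBLoop (PySem.Set.ofList (pvNeighbors (PySem.Int.toChars o))) known

-- ===== PRECONDITION & SPEC =====
def Spec_tba_fuzzy_match_py (ocr : Option Int) (known : List Int) (out : Option Int) : Prop := out = tba_fuzzy_match_py_alt ocr known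
instance (ocr : Option Int) (known : List Int) (out : Option Int) : Decidable (Spec_tba_fuzzy_match_py ocr known out) := by unfold Spec_tba_fuzzy_match_py; infer_instance

-- ===== CLAIM (what is proved, stated in full; the proofs are below) =====
def Claim_equal_tba_fuzzy_match_py : Prop := ∀ (ocr : Option Int) (known : List Int), Dom_tba_fuzzy_match_py ocr known → Spec_tba_fuzzy_match_py ocr known (tba_fuzzy_match_py ocr known)

-- ===== LEMMAS AND PROOFS =====

-- every character of str(n) is in pvAlpha
theorem pv_digitChar_mem (n : Nat) : Nat.digitChar (n % 10) ∈ pvAlpha := by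
  have h : n % 10 < 10 := Nat.mod_lt _ (by norm_num)
  interval_cases h : n % 10 <;> decide

theorem pv_toDigitsCore_mem : ∀ (fuel n : Nat) (ds : List Char),
    (∀ c ∈ ds, c ∈ pvAlpha) → ∀ c ∈ Nat.toDigitsCore 10 fuel n ds, c ∈ pvAlpha := by
  intro fuel
  induction fuel with
  | zero => intro n ds hds c hc; exact hds c hc
  | succ f ih =>
      intro n ds hds c hc
      simp only [Nat.toDigitsCore] at hc
      split at hc
      · rcases List.mem_cons.mp hc with h | h
        · exact h ▸ pv_digitChar_mem n
        · exact hds c h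
      · exact ih _ _ (by
          intro c' hc'
          rcases List.mem_cons.mp hc' with h | h
          · exact h ▸ pv_digitChar_mem n
          · exact hds c' h) c hc

theorem pv_toChars_mem (t : Int) : ∀ c ∈ PySem.Int.toChars t, c ∈ pvAlpha := by
  intro c hc
  simp only [PySem.Int.toChars, Nat.toDigits] at hc
  split at hc
  · rcases List.mem_cons.mp hc with h | h
    · subst h; decide
    · exact pv_toDigitsCore_mem _ _ _ (by intro c hc; cases hc) c h
  · exact pv_toDigitsCore_mem _ _ _ (by intro c hc; cases hc) c hc

-- counting differing positions
theorem pv_diff_self (t : List Char) : (t.zip t).countP (fun p => p.1 != p.2) = 0 := by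
  induction t with
  | nil => rfl
  | cons a t ih => simp [List.countP_cons, ih]

theorem pv_diff_zero (s1 s2 : List Char) (h : s1.length = s2.length)
    (h0 : (s1.zip s2).countP (fun p => p.1 != p.2) = 0) : s1 = s2 := by
  induction s1 generalizing s2 with
  | nil => cases s2 with
      | nil => rfl
      | cons b u => simp at h
  | cons a t ih =>
      cases s2 with
      | nil => simp at h
      | cons b u =>
          simp only [List.zip_cons_cons, List.countP_cons] at h0
          obtain ⟨h0t, h0h⟩ := Nat.add_eq_zero.mp h0
          have hab : a = b := by
            by_contra hab
            rw [if_pos (by simp [hab])] at h0h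
            exact one_ne_zero h0h
          subst hab
          exact congrArg (a :: ·) (ih u (by simpa using h) h0t)

theorem pv_diff_set (s1 : List Char) (i : Nat) (hi : i < s1.length) (c : Char)
    (hc : c ≠ s1[i]!) :
    (s1.zip (s1.set i c)).countP (fun p => p.1 != p.2) = 1 := by
  induction s1 generalizing i with
  | nil => simp at hi
  | cons a t ih =>
      cases i with
      | zero =>
          have hca : c ≠ a := by simpa [List.getElem!_cons_zero] using hc
          simp [List.countP_cons, pv_diff_self, Ne.symm hca]
      | succ j =>
          have hj : j < t.length := by simpa using hi
          have hc' : c ≠ t[j]! := by simpa [List.getElem!_cons_succ] using hc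
          simp [List.countP_cons, ih j hj hc']

theorem pv_diff_one (s1 s2 : List Char) (h : s1.length = s2.length)
    (h1 : (s1.zip s2).countP (fun p => p.1 != p.2) = 1) :
    ∃ i, i < s1.length ∧ s2[i]! ≠ s1[i]! ∧ s2 = s1.set i s2[i]! := by
  induction s1 generalizing s2 with
  | nil => cases s2 <;> simp_all
  | cons a t ih =>
      cases s2 with
      | nil => simp at h
      | cons b u =>
          have hlen : t.length = u.length := by simpa using h
          simp only [List.zip_cons_cons, List.countP_cons] at h1
          by_cases hab : a = b
          · have h1' : (t.zip u).countP (fun p => p.1 != p.2) = 1 := by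
              rw [if_neg (by simp [hab])] at h1; omega
            obtain ⟨i, hi, hne, hset⟩ := ih u hlen h1'
            subst hab
            refine ⟨i + 1, by simpa using hi, ?_, ?_⟩
            · simpa [List.getElem!_cons_succ] using hne
            · simpa [List.getElem!_cons_succ] using congrArg (a :: ·) hset
          · have h1' : (t.zip u).countP (fun p => p.1 != p.2) = 0 := by
              rw [if_pos (by simp [hab])] at h1; omega
            have htu := pv_diff_zero t u hlen h1'
            exact ⟨0, by simp, by simpa [List.getElem!_cons_zero] using Ne.symm hab,
              by simp [List.getElem!_cons_zero, htu]⟩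

theorem pv_mem_neighbors (s1 s2 : List Char) :
    s2 ∈ pvNeighbors s1 ↔
      ∃ i, i < s1.length ∧ ∃ d, d ∈ pvAlpha ∧ d ≠ s1[i]! ∧ s2 = s1.set i d := by
  simp only [pvNeighbors, List.mem_flatMap, List.mem_range, List.mem_filterMap]
  constructor
  · rintro ⟨i, hi, d, hd, hif⟩
    by_cases hds : d = s1[i]!
    · rw [if_pos hds] at hif; cases hif
    · rw [if_neg hds] at hif
      exact ⟨i, hi, d, hd, hds, (Option.some.inj hif).symm⟩
  · rintro ⟨i, hi, d, hd, hds, hs⟩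
    exact ⟨i, hi, d, hd, by rw [if_neg hds, hs]⟩

theorem pv_cond_iff (s1 : List Char) (t : Int) :
    (PySem.Int.toChars t ∈ pvNeighbors s1) ↔
      (s1.length = (PySem.Int.toChars t).length ∧
        (s1.zip (PySem.Int.toChars t)).countP (fun p => p.1 != p.2) = 1) := by
  have halpha : ∀ c ∈ PySem.Int.toChars t, c ∈ pvAlpha := pv_toChars_mem t
  generalize PySem.Int.toChars t = s2 at halpha ⊢
  rw [pv_mem_neighbors]
  constructor
  · rintro ⟨i, hi, d, -, hds, rfl⟩
    exact ⟨by simp, pv_diff_set s1 i hi d hds⟩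
  · rintro ⟨hlen, h1⟩
    obtain ⟨i, hi, hne, hset⟩ := pv_diff_one s1 s2 hlen h1
    refine ⟨i, hi, s2[i]!, ?_, hne, hset⟩
    have hi2 : i < s2.length := hlen ▸ hi
    have hgi : s2[i]! = s2[i] := by
      simp [List.getElem!_eq_getElem?_getD, List.getElem?_eq_getElem hi2]
    exact halpha _ (hgi ▸ List.getElem_mem hi2)

theorem pv_loops_eq (s1 : List Char) (known : List Int) :
    pvALoop s1 known = pvBLoop (PySem.Set.ofList (pvNeighbors s1)) known := by
  induction known with
  | nil => rfl
  | cons t rest ih =>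
      simp only [pvALoop, pvBLoop]
      by_cases hc : s1.length = (PySem.Int.toChars t).length ∧
          (s1.zip (PySem.Int.toChars t)).countP (fun p => p.1 != p.2) = 1
      · have hmem : PySem.Int.toChars t ∈ pvNeighbors s1 := (pv_cond_iff s1 t).mpr hc
        have : PySem.Set.contains (PySem.Set.ofList (pvNeighbors s1))
            (PySem.Int.toChars t) = true := by
          rw [PySem.Set.contains_iff, PySem.Set.mem_ofList]; exact hmem
        rw [if_pos hc, this]
        simp
      · have hmem : PySem.Int.toChars t ∉ pvNeighbors s1 :=
          fun h => hc ((pv_cond_iff s1 t).mp h)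
        have : PySem.Set.contains (PySem.Set.ofList (pvNeighbors s1))
            (PySem.Int.toChars t) = false := by
          rw [Bool.eq_false_iff]
          intro h
          exact hmem ((PySem.Set.mem_ofList _ _).mp ((PySem.Set.contains_iff _ _).mp h))
        rw [if_neg hc, this, ih]
        simp

-- ===== VERDICT (by name: the statement is the Claim_ definition above) =====
theorem tba_fuzzy_match_py_spec : Claim_equal_tba_fuzzy_match_py := by
  intro ocr known _
  unfold Spec_tba_fuzzy_match_py tba_fuzzy_match_py tba_fuzzy_match_py_alt
  match ocr with
  | none => rfl
  | some o =>
      by_cases h1 : known.isEmpty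
      · simp [h1]
      · by_cases h2 : o ∈ known
        · simp [h1, h2]
        · simp [h1, h2, pv_loops_eq]
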